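-- pv_equiv track=rewrite | github.com/hannibalbaldwin/acoustimator | src/models/features.py | _product_tier
-- ===== SOURCE A (Python) =====
-- PRODUCT_TIER_KEYWORDS: list[tuple[int, list[str]]] = [
--     (3, ["woodworks", "wood", "rpg", "specialty", "custom", "curved", "radius"]),
--     (
--         2,
--         [
--             "premium",
--             "high nrc",
--             "clima plus",
--             "fine fissured",
--             "dune",
--             "cortega supreme",
--             "mineral fiber",
--             "snap-tex",
--             "fabricmate",
--             "kirei",
--             "ultima",
--         ],
--     ),
--     (
--         1,
--         [
--             "standard",
--             "cirrus",
--             "eclipse",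
--             "mars",
--             "cortega",
--             "interlude",
--             "prelude",
--             "beveled",
--             "tegular",
--             "2x2",
--             "2x4",
--             "lay-in",
--         ],
--     ),
--     (0, ["economy", "basic", "budget"]),
-- ]
--
-- def _product_tier(product_name: str | None) -> int:
--     """Return 0-3 product tier from product name keywords."""
--     if not product_name or not isinstance(product_name, str):
--         return 1  # assume standard if unknown
--     pn_lower = product_name.lower()
--     for tier, kws in PRODUCT_TIER_KEYWORDS:
--         if any(kw in pn_lower for kw in kws):
--             return tier
--     return 1  # default standard
-- ===== SOURCE B (Python) =====
-- PRODUCT_TIER_KEYWORDS: list[tuple[int, list[str]]] = [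
--     (3, ["woodworks", "wood", "rpg", "specialty", "custom", "curved", "radius"]),
--     (2, ["premium", "high nrc", "clima plus", "fine fissured", "dune",
--          "cortega supreme", "mineral fiber", "snap-tex", "fabricmate",
--          "kirei", "ultima"]),
--     (1, ["standard", "cirrus", "eclipse", "mars", "cortega", "interlude",
--          "prelude", "beveled", "tegular", "2x2", "2x4", "lay-in"]),
--     (0, ["economy", "basic", "budget"]),
-- ]
--
--
-- def _product_tier(product_name):
--     """Return 0-3 product tier from product name keywords."""
--     if not product_name or not isinstance(product_name, str):
--         return 1
--     pn_lower = product_name.lower()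
--     matches = [tier for tier, kws in PRODUCT_TIER_KEYWORDS
--                if any(kw in pn_lower for kw in kws)]
--     return max(matches) if matches else 1
-- ===== Notes on version B (the rewrite author's own statement) =====
-- stated objective: alternative
-- what changed: Replaced the priority-ordered loop with early return by a gather-then-reduce: collect every tier whose keyword group matches, then take max(matches) with 1 as the empty default (correct because the tier groups are listed in strictly descending order).
import Mathlib
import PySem

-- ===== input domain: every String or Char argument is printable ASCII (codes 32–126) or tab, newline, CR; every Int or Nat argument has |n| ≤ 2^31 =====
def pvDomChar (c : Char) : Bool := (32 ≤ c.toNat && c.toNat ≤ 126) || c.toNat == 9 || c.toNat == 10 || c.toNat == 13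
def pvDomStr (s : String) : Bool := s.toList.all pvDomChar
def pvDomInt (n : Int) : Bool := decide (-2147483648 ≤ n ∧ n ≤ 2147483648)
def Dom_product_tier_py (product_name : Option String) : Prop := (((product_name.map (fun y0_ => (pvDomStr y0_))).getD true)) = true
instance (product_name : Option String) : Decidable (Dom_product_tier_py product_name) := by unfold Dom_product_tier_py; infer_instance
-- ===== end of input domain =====

-- B replaces A's priority-ordered early-return loop by gather-all-matching-tiers then max (default 1); same cost, different decomposition.

-- shared module constant PRODUCT_TIER_KEYWORDS
def pvKeywords : List (Int × List String) :=
  [ (3, ["woodworks", "wood", "rpg", "specialty", "custom", "curved", "radius"]),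
    (2, ["premium", "high nrc", "clima plus", "fine fissured", "dune",
         "cortega supreme", "mineral fiber", "snap-tex", "fabricmate",
         "kirei", "ultima"]),
    (1, ["standard", "cirrus", "eclipse", "mars", "cortega", "interlude",
         "prelude", "beveled", "tegular", "2x2", "2x4", "lay-in"]),
    (0, ["economy", "basic", "budget"]) ]

-- ===== PORT A =====
-- the 'for tier, kws in …: if any(…): return tier' loop, as structural recursion with the 'return 1' fall-through
def pvFirstTier (pn : String) : List (Int × List String) → Int
  | [] => 1
  | (t, kws) :: rest => if kws.any (fun kw => PySem.Str.isIn kw pn) then t else pvFirstTier pn rest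

def product_tier_py (product_name : Option String) : Int :=
  match product_name with
  | none => 1                                   -- 'not product_name' (None)
  | some s =>
    if s = "" then 1                            -- 'not product_name' (empty string)
    else pvFirstTier (PySem.Str.lower s) pvKeywords

-- ===== PORT B =====
def product_tier_py_alt (product_name : Option String) : Int :=
  match product_name with
  | none => 1
  | some s =>
    if s = "" then 1
    else
      let pn := PySem.Str.lower s
      let ms := (pvKeywords.filter (fun p => p.2.any (fun kw => PySem.Str.isIn kw pn))).map (fun p => p.1)
      match PySem.List.max? ms (fun x => x) with   -- max(matches) if matches else 1
      | some m => m
      | none => 1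

-- ===== PRECONDITION & SPEC =====
def Spec_product_tier_py (product_name : Option String) (out : Int) : Prop := out = product_tier_py_alt product_name
instance (product_name : Option String) (out : Int) : Decidable (Spec_product_tier_py product_name out) := by unfold Spec_product_tier_py; infer_instance

-- ===== CLAIM (what is proved, stated in full; the proofs are below) =====
def Claim_equal_product_tier_py : Prop := ∀ (product_name : Option String), Dom_product_tier_py product_name → Spec_product_tier_py product_name (product_tier_py product_name)

-- ===== LEMMAS AND PROOFS =====
-- core: first-match-wins over the descending groups equals max-of-matches (default 1)
theorem pvCore (pn : String) :
    pvFirstTier pn pvKeywords =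
      (match PySem.List.max?
          ((pvKeywords.filter (fun p => p.2.any (fun kw => PySem.Str.isIn kw pn))).map (fun p => p.1))
          (fun x => x) with
       | some m => m
       | none => 1) := by
  simp only [pvKeywords, pvFirstTier, List.filter]
  generalize (["woodworks", "wood", "rpg", "specialty", "custom", "curved", "radius"]).any (fun kw => PySem.Str.isIn kw pn) = b3
  generalize (["premium", "high nrc", "clima plus", "fine fissured", "dune",
         "cortega supreme", "mineral fiber", "snap-tex", "fabricmate",
         "kirei", "ultima"]).any (fun kw => PySem.Str.isIn kw pn) = b2
  generalize (["standard", "cirrus", "eclipse", "mars", "cortega", "interlude",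
         "prelude", "beveled", "tegular", "2x2", "2x4", "lay-in"]).any (fun kw => PySem.Str.isIn kw pn) = b1
  generalize (["economy", "basic", "budget"]).any (fun kw => PySem.Str.isIn kw pn) = b0
  cases b3 <;> cases b2 <;> cases b1 <;> cases b0 <;> simp [PySem.List.max?]

-- ===== VERDICT (by name: the statement is the Claim_ definition above) =====
theorem product_tier_py_spec : Claim_equal_product_tier_py := by
  intro product_name _
  unfold Spec_product_tier_py product_tier_py product_tier_py_alt
  cases product_name with
  | none => rfl
  | some s =>
    by_cases hs : s = ""
    · simp [hs]
    · simp only [if_neg hs]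
      exact pvCore (PySem.Str.lower s)
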